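-- pv_equiv track=rewrite | github.com/kambekson/lab-1-diff | lab1_core.py | best_differentials
-- ===== SOURCE A (Python) =====
-- def best_differentials(ddt, skip_dx0=True):
--     """Список (dx, dy, count) по убыванию count."""
--     result = []
--     for dx, row in enumerate(ddt):
--         if skip_dx0 and dx == 0:
--             continue
--         for dy, cnt in enumerate(row):
--             if cnt > 0:
--                 result.append((dx, dy, cnt))
--     result.sort(key=lambda x: -x[2])
--     return result
-- ===== SOURCE B (Python) =====
-- def best_differentials(ddt, skip_dx0=True):
--     """Bucket the nonzero entries by count in a dict, then sort only the
--     distinct counts (descending) and concatenate the buckets; the stable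
--     sort of A keeps equal counts in scan order, which bucketing reproduces."""
--     buckets = {}
--     for dx, row in enumerate(ddt):
--         if skip_dx0 and dx == 0:
--             continue
--         for dy, cnt in enumerate(row):
--             if cnt > 0:
--                 buckets.setdefault(cnt, []).append((dx, dy, cnt))
--     out = []
--     for cnt in sorted(buckets, reverse=True):
--         out += buckets[cnt]
--     return out
-- ===== Notes on version B (the rewrite author's own statement) =====
-- stated objective: alternative
-- what changed: Instead of appending all nonzero entries to one list and stably sorting the whole list by -count, B groups the entries into per-count buckets in a dict and only sorts the distinct counts descending, concatenating the buckets.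
import Mathlib
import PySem

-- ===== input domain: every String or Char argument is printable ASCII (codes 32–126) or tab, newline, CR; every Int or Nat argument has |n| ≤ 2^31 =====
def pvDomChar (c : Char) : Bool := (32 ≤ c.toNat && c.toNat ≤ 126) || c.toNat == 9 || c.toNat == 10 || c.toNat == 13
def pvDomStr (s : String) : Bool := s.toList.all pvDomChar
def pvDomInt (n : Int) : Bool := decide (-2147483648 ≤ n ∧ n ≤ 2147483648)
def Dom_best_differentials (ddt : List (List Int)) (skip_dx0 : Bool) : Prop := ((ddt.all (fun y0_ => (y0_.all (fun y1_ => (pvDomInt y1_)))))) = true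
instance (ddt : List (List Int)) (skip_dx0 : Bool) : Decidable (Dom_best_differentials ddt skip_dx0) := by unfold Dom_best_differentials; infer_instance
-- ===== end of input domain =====

-- B buckets the nonzero entries by count in a dict and sorts only the distinct counts
-- descending, where A stably sorts the whole entry list by -count (alternative decomposition).

-- ===== PORT A =====
def best_differentials (ddt : List (List Int)) (skip_dx0 : Bool) : List (Int × Int × Int) :=
  let result := (PySem.List.enumerate ddt).foldl
    (fun res p =>
      if skip_dx0 && p.1 == 0 then res
      else (PySem.List.enumerate p.2).foldl
        (fun res q => if q.2 > 0 then res ++ [(p.1, q.1, q.2)] else res) res)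
    []
  PySem.List.sorted result (fun x => -x.2.2) false

-- ===== PORT B =====
def best_differentials_alt (ddt : List (List Int)) (skip_dx0 : Bool) : List (Int × Int × Int) :=
  let buckets : PySem.Dict Int (List (Int × Int × Int)) := (PySem.List.enumerate ddt).foldl
    (fun b p =>
      if skip_dx0 && p.1 == 0 then b
      else (PySem.List.enumerate p.2).foldl
        (fun b q => if q.2 > 0 then b.modify q.2 [] (fun l => l ++ [(p.1, q.1, q.2)]) else b) b)
    PySem.Dict.empty
  (PySem.List.sorted buckets.keys (fun c => c) true).foldl (fun out c => out ++ buckets.getD c []) []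

-- ===== PRECONDITION & SPEC =====
def Spec_best_differentials (ddt : List (List Int)) (skip_dx0 : Bool) (out : List (Int × Int × Int)) : Prop := out = best_differentials_alt ddt skip_dx0
instance (ddt : List (List Int)) (skip_dx0 : Bool) (out : List (Int × Int × Int)) : Decidable (Spec_best_differentials ddt skip_dx0 out) := by unfold Spec_best_differentials; infer_instance

-- ===== CLAIM (what is proved, stated in full; the proofs are below) =====
def Claim_equal_best_differentials : Prop := ∀ (ddt : List (List Int)) (skip_dx0 : Bool), Dom_best_differentials ddt skip_dx0 → Spec_best_differentials ddt skip_dx0 (best_differentials ddt skip_dx0)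

-- ===== LEMMAS AND PROOFS =====

-- the flat list of nonzero entries in scan order (both ports' collection loops walk it)
def pieceOf (skip_dx0 : Bool) (p : Int × List Int) : List (Int × Int × Int) :=
  if skip_dx0 && p.1 == 0 then []
  else ((PySem.List.enumerate p.2).filter (fun q => decide (q.2 > 0))).map (fun q => (p.1, q.1, q.2))

def hitsOf (ddt : List (List Int)) (skip_dx0 : Bool) : List (Int × Int × Int) :=
  (PySem.List.enumerate ddt).flatMap (pieceOf skip_dx0)

-- either port's double collection loop is a fold of its `step` over the flat hit list
lemma double_fold_flatten {σ : Type} (skip_dx0 : Bool) (step : σ → (Int × Int × Int) → σ) :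
    ∀ (L : List (Int × List Int)) (s : σ),
      L.foldl
        (fun s p =>
          if skip_dx0 && p.1 == 0 then s
          else (PySem.List.enumerate p.2).foldl
            (fun s q => if q.2 > 0 then step s (p.1, q.1, q.2) else s) s)
        s
      = (L.flatMap (pieceOf skip_dx0)).foldl step s := by
  intro L
  induction L with
  | nil => intro s; simp
  | cons p L' ih =>
    intro s
    rw [List.foldl_cons, List.flatMap_cons, List.foldl_append, ih]
    congr 1
    unfold pieceOf
    by_cases hc : (skip_dx0 && p.1 == 0) = true
    · simp [hc]
    · simp only [hc, if_false, Bool.false_eq_true]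
      rw [List.foldl_map, List.foldl_filter]
      apply PySem.List.foldl_congr_mem
      intro s' q _
      by_cases hq : q.2 > 0 <;> simp [hq]

lemma insertBy_all_before {α : Type} (before : α → α → Bool) (x : α) (l : List α)
    (h : ∀ y ∈ l, before x y = true) :
    PySem.List.insertBy before x l = x :: l := by
  cases l with
  | nil => simp [PySem.List.insertBy]
  | cons y ys => simp [PySem.List.insertBy, h y (by simp)]

lemma insertBy_append_left {α : Type} (before : α → α → Bool) (x : α) :
    ∀ (l1 l2 : List α), (∀ y ∈ l1, before x y = false) →
      PySem.List.insertBy before x (l1 ++ l2) = l1 ++ PySem.List.insertBy before x l2 := by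
  intro l1
  induction l1 with
  | nil => intro l2 _; simp
  | cons y ys ih =>
    intro l2 h
    have hy : before x y = false := h y (by simp)
    simp [PySem.List.insertBy, hy, ih l2 (fun z hz => h z (by simp [hz]))]

-- inserting x into a bucket concatenation (buckets in strictly descending key order,
-- ascending sort key -key) puts x at the end of its own bucket
lemma insert_into_buckets {α : Type} (key : α → Int) (x : α) :
    ∀ (K : List Int) (F : Int → List α),
      K.Pairwise (fun a b => b < a) → (∀ c ∈ K, ∀ y ∈ F c, key y = c) → key x ∈ K →
      PySem.List.insertBy (fun a b => decide (-key a < -key b)) x (K.flatMap F)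
        = K.flatMap (fun c => F c ++ if key x == c then [x] else []) := by
  intro K
  induction K with
  | nil => intro F _ _ hx; simp at hx
  | cons c K' ih =>
    intro F hP hF hx
    have hlt : ∀ c' ∈ K', c' < c := fun c' hc' => (List.pairwise_cons.mp hP).1 c' hc'
    have hP' : K'.Pairwise (fun a b => b < a) := (List.pairwise_cons.mp hP).2
    have hFc : ∀ y ∈ F c, key y = c := hF c (by simp)
    rw [List.flatMap_cons, List.flatMap_cons]
    by_cases hxc : key x = c
    · -- x belongs to the head bucket: goes right after F c
      have h1 : ∀ y ∈ F c, (decide (-key x < -key y)) = false := by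
        intro y hy; simp [hFc y hy, hxc]
      rw [insertBy_append_left _ _ _ _ h1]
      have h2 : ∀ z ∈ K'.flatMap F, (decide (-key x < -key z)) = true := by
        intro z hz
        rcases List.mem_flatMap.mp hz with ⟨c', hc', hzF⟩
        have := hF c' (by simp [hc']) z hzF
        have := hlt c' hc'
        simp [*]
      rw [insertBy_all_before _ _ _ h2]
      have hxcs : (if key x = c then [x] else []) = [x] := by simp [hxc]
      have h3 : K'.flatMap (fun c' => F c' ++ if key x == c' then [x] else []) = K'.flatMap F := by
        apply List.flatMap_congr
        intro c' hc'
        have : key x ≠ c' := by have := hlt c' hc'; omega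
        simp [this]
      rw [h3]
      simp [hxc]
    · -- x belongs to a later bucket
      have hx' : key x ∈ K' := by
        cases hx with
        | head => exact absurd rfl hxc
        | tail _ h => exact h
      have hxlt : key x < c := hlt _ hx'
      have h1 : ∀ y ∈ F c, (decide (-key x < -key y)) = false := by
        intro y hy; simp [hFc y hy]; omega
      rw [insertBy_append_left _ _ _ _ h1, ih F hP' (fun c' hc' => hF c' (by simp [hc'])) hx']
      simp [beq_iff_eq, hxc]

-- a stable ascending sort by -key is the concatenation of the key-buckets along any
-- strictly descending key list K covering all keys
lemma sorted_neg_key_eq_buckets {α : Type} (key : α → Int) (K : List Int)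
    (hK : K.Pairwise (fun a b => b < a)) :
    ∀ (xs : List α), (∀ x ∈ xs, key x ∈ K) →
      PySem.List.sorted xs (fun x => -key x) false
        = K.flatMap (fun c => xs.filter (fun x => key x == c)) := by
  intro xs
  induction xs using List.reverseRecOn with
  | nil => simp [PySem.List.sorted]
  | append_singleton ys x ih =>
    intro h
    rw [PySem.List.sorted_eq_foldl_insertBy, List.foldl_append, ← PySem.List.sorted_eq_foldl_insertBy]
    rw [ih (fun z hz => h z (by simp [hz]))]
    simp only [List.foldl_cons, List.foldl_nil]
    rw [insert_into_buckets key x K _ hK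
        (fun c hc y hy => by simpa using (List.of_mem_filter hy)) (h x (by simp))]
    apply List.flatMap_congr
    intro c hc
    simp only [List.filter_append, List.filter]
    by_cases hxc : key x = c
    · rw [show (key x == c) = true from by simp [hxc]]
      simp
    · rw [show (key x == c) = false from by simp [hxc]]
      simp

-- ===== VERDICT (by name: the statement is the Claim_ definition above) =====
theorem best_differentials_spec : Claim_equal_best_differentials := by
  intro ddt skip_dx0 _
  unfold Spec_best_differentials
  -- A side: the collection loop produces the flat hit list
  have hA : (PySem.List.enumerate ddt).foldl
      (fun res p =>
        if skip_dx0 && p.1 == 0 then res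
        else (PySem.List.enumerate p.2).foldl
          (fun res q => if q.2 > 0 then res ++ [(p.1, q.1, q.2)] else res) res)
      ([] : List (Int × Int × Int))
      = (hitsOf ddt skip_dx0).foldl (fun res t => res ++ [t]) [] :=
    double_fold_flatten skip_dx0 (fun res t => res ++ [t]) (PySem.List.enumerate ddt) []
  rw [PySem.List.foldl_append_singleton] at hA
  simp only [List.nil_append] at hA
  -- B side: the bucket dict
  have hB : (PySem.List.enumerate ddt).foldl
      (fun b p =>
        if skip_dx0 && p.1 == 0 then b
        else (PySem.List.enumerate p.2).foldl
          (fun b q => if q.2 > 0 then b.modify q.2 [] (fun l => l ++ [(p.1, q.1, q.2)]) else b) b)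
      (PySem.Dict.empty : PySem.Dict Int (List (Int × Int × Int)))
      = (hitsOf ddt skip_dx0).foldl (fun b t => b.modify t.2.2 [] (fun l => l ++ [t])) PySem.Dict.empty :=
    double_fold_flatten skip_dx0 (fun b t => b.modify t.2.2 [] (fun l => l ++ [t]))
      (PySem.List.enumerate ddt) PySem.Dict.empty
  set d : PySem.Dict Int (List (Int × Int × Int)) :=
    (hitsOf ddt skip_dx0).foldl (fun b t => b.modify t.2.2 [] (fun l => l ++ [t])) PySem.Dict.empty with hd
  have hmap : d = ((hitsOf ddt skip_dx0).map (fun t => (t.2.2, t))).foldl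
      (fun b (p : Int × (Int × Int × Int)) => b.modify p.1 [] (fun l => l ++ [p.2])) PySem.Dict.empty := by
    rw [List.foldl_map]
  have hgetD : ∀ c : Int, d.getD c [] = (hitsOf ddt skip_dx0).filter (fun t => t.2.2 == c) := by
    intro c
    rw [hmap, PySem.Dict.getD_foldl_modify_append]
    simp [List.filter_map, List.map_map, Function.comp_def]
  have hkeys : d.keys = PySem.Set.update (PySem.Dict.empty : PySem.Dict Int (List (Int × Int × Int))).keys
      ((hitsOf ddt skip_dx0).map (fun t => t.2.2)) :=
    PySem.Dict.keys_foldl_modify_key _ _ _ _ _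
  have hnodup : d.keys.Nodup :=
    PySem.Dict.nodup_keys_foldl_modify_key _ _ _ _ _ (by simp [PySem.Dict.keys_empty])
  have hmemkeys : ∀ c : Int, c ∈ d.keys ↔ c ∈ (hitsOf ddt skip_dx0).map (fun t => t.2.2) := by
    intro c
    rw [hkeys, PySem.Set.mem_update]
    simp [PySem.Dict.keys_empty]
  set K : List Int := PySem.List.sorted d.keys (fun c => c) true with hK
  have hKnodup : K.Nodup := ((PySem.List.sorted_perm d.keys (fun c => c) true).nodup_iff).mpr hnodup
  have hKle : K.Pairwise (fun a b => b ≤ a) := PySem.List.sorted_pairwise_rev d.keys (fun c => c)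
  have hKlt : K.Pairwise (fun a b => b < a) :=
    (hKle.and hKnodup).imp (fun h => lt_of_le_of_ne h.1 (fun e => h.2 e.symm))
  have hcov : ∀ t ∈ (hitsOf ddt skip_dx0), t.2.2 ∈ K := by
    intro t ht
    rw [hK, PySem.List.mem_sorted, hmemkeys]
    exact List.mem_map_of_mem ht
  -- assemble
  simp only [best_differentials, best_differentials_alt]
  rw [hA, hB]
  have hmain : PySem.List.sorted (hitsOf ddt skip_dx0) (fun x => -x.2.2) false
      = K.flatMap (fun c => (hitsOf ddt skip_dx0).filter (fun t => t.2.2 == c)) :=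
    sorted_neg_key_eq_buckets (fun t => t.2.2) K hKlt (hitsOf ddt skip_dx0) hcov
  rw [hmain]
  have hout : K.foldl (fun out c => out ++ d.getD c []) ([] : List (Int × Int × Int))
      = [] ++ K.flatMap (fun c => d.getD c []) := PySem.List.foldl_append_eq_flatMap _ _ _
  rw [← hK, hout, List.nil_append]
  exact (List.flatMap_congr (fun c _ => (hgetD c).symm))
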